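-- pv_equiv track=rewrite | github.com/tsuru7/algorithm-study | AtCoder/ABC269/C.py | solve
-- ===== SOURCE A (Python) =====
-- def solve(n):
--     s = bin(n)[2:]
--     s = s[::-1]
--     ones = []
--     for i in range(len(s)):
--         if s[i] == '1':
--             ones.append(i)
--     m = len(ones)
--     ALL = 2**m
--     ans=[]
--     for x in range(ALL):
--         tmp = 0
--         for j in range(m):
--             if x & 1<<j > 0:
--                 tmp += 1<<ones[j]
--         ans.append(tmp)
--     return ans
-- ===== SOURCE B (Python) =====
-- def solve(n):
--     m = -n if n < 0 else n
--     ans = [0]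
--     b = 1
--     while m:
--         if m & 1:
--             ans = ans + [t + b for t in ans]
--         m >>= 1
--         b <<= 1
--     return ans
-- ===== Notes on version B (the rewrite author's own statement) =====
-- stated objective: faster
-- what changed: Instead of extracting the set-bit positions and then, for each of the exponentially many subset counters, re-scanning every bit position to rebuild the subset sum from scratch, B scans the bits of the absolute value once and doubles the answer list in place (appending a shifted copy) at each set bit, producing the same list in the same order with constant work per output element.
import Mathlib
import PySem

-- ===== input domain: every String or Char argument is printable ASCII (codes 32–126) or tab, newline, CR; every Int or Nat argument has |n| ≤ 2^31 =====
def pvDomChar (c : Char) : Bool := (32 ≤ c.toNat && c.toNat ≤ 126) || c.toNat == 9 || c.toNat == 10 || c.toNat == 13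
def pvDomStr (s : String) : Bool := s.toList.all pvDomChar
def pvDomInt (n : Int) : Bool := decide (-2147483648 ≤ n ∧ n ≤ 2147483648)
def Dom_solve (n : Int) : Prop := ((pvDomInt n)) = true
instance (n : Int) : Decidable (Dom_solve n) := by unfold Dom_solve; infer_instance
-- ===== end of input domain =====

-- B enumerates the same subset sums in the same order by doubling the answer list once per
-- set bit of |n| instead of re-scanning all bit positions for each subset counter as A does.

-- ===== PORT A =====
def solve (n : Int) : List Int :=
  let s := PySem.Int.pyBin n                                -- s = bin(n)[2:]
  let s1 := PySem.Str.slice s (some 2) none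
  let s2 := (PySem.Str.slice? s1 none none (-1)).getD s1    -- s = s[::-1]
  let ones : List Int :=
    (PySem.List.pyRange 0 (PySem.Str.len s2) 1).foldl
      (fun ones i => if PySem.Str.pyGet? s2 i = some '1' then ones ++ [i] else ones) []
  let m : Int := PySem.List.len ones
  let ALL : Int := (2 : Int) ^ m.toNat                      -- ALL = 2**m
  (PySem.List.pyRange 0 ALL 1).foldl
    (fun ans x =>
      let tmp : Int :=
        (PySem.List.pyRange 0 m 1).foldl
          (fun tmp j =>
            if PySem.Int.band x ((1 : Int) <<< j.toNat) > 0 then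
              tmp + ((1 : Int) <<< (PySem.List.pyGetD ones j 0).toNat)
            else tmp) 0
      ans ++ [tmp]) []

-- ===== PORT B =====
-- the 'while m:' loop of Source B: m is the remaining bits, b the value of the current bit
def solveAltGo (fuel : Nat) (m : Nat) (b : Int) (ans : List Int) : List Int :=
  match fuel with
  | 0 => ans
  | fuel + 1 =>
    if m = 0 then ans
    else
      solveAltGo fuel (m >>> 1) (b <<< (1:Nat))
        (if m &&& 1 = 1 then ans ++ ans.map (fun t => t + b) else ans)

def solve_alt (n : Int) : List Int :=
  solveAltGo (if n < 0 then -n else n).toNat (if n < 0 then -n else n).toNat 1 [0]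

-- ===== PRECONDITION & SPEC =====
def Spec_solve (n : Int) (out : List Int) : Prop := out = solve_alt n
instance (n : Int) (out : List Int) : Decidable (Spec_solve n out) := by unfold Spec_solve; infer_instance

-- ===== CLAIM (what is proved, stated in full; the proofs are below) =====
def Claim_equal_solve : Prop := ∀ (n : Int), Dom_solve n → Spec_solve n (solve n)

-- ===== LEMMAS AND PROOFS =====

/-- The common shape both programs compute: starting from `[0]`, each set-bit position `o`
doubles the list by appending a `+2^o`-shifted copy. -/
def sstep (a : List Int) (o : Nat) : List Int := a ++ a.map (fun t => t + (2 : Int) ^ o)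

/-- Core's `Nat.toDigits 2` is the big-endian binary digit characters. -/
theorem toDigitsCore_two_eq (f : Nat) : ∀ (n : Nat) (acc : List Char), 0 < n → n < f →
    Nat.toDigitsCore 2 f n acc = ((Nat.digits 2 n).map Nat.digitChar).reverse ++ acc := by
  induction f with
  | zero => intro n acc h1 h2; omega
  | succ f ih =>
    intro n acc h1 h2
    rw [Nat.toDigitsCore]
    by_cases h : n / 2 = 0
    · have hn1 : n = 1 := by omega
      subst hn1
      simp
    · simp only [h, if_false]
      rw [ih (n / 2) _ (by omega) (by omega)]
      rw [Nat.digits_def' (by norm_num : 1 < 2) h1]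
      simp

theorem toDigits_two_eq (n : Nat) (h : 0 < n) :
    Nat.toDigits 2 n = ((Nat.digits 2 n).map Nat.digitChar).reverse := by
  rw [Nat.toDigits, toDigitsCore_two_eq (n+1) n [] h (by omega)]
  simp

/-- Collecting the indices of '1' characters in the little-endian digit string gives
exactly the set-bit positions. -/
theorem filter_ones_digits (N : Nat) :
    (List.range ((Nat.digits 2 N).map Nat.digitChar).length).filter
        (fun i => decide ((((Nat.digits 2 N).map Nat.digitChar))[i]? = some '1'))
      = Nat.bitIndices N := by
  induction N using Nat.strong_induction_on with
  | _ N ih =>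
    rcases Nat.eq_zero_or_pos N with h0 | hpos
    · subst h0; simp
    · rw [Nat.digits_def' (by norm_num : 1 < 2) hpos]
      have hrec := ih (N / 2) (by omega)
      set cs' := (Nat.digits 2 (N / 2)).map Nat.digitChar with hcs'
      set c := Nat.digitChar (N % 2) with hc
      have hmap : ((N % 2 :: Nat.digits 2 (N / 2)).map Nat.digitChar) = c :: cs' := by
        simp [hcs', hc]
      rw [hmap]
      have hlen : (c :: cs').length = cs'.length + 1 := by simp
      rw [hlen, List.range_succ_eq_map, List.filter_cons]
      have htail : List.filter (fun i => decide ((c :: cs')[i]? = some '1'))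
          ((List.range cs'.length).map Nat.succ)
          = (Nat.bitIndices (N / 2)).map Nat.succ := by
        rw [List.filter_map, ← hrec]
        congr 1

      rw [htail]
      rcases Nat.mod_two_eq_zero_or_one N with hp | hp
      · have hm2 : N = 2 * (N / 2) := by omega
        have hc0 : (decide ((c :: cs')[0]? = some '1')) = false := by
          rw [hc, hp]; simp [Nat.digitChar]
        rw [hc0]
        simp only [Bool.false_eq_true, if_false]
        conv_rhs => rw [hm2, Nat.bitIndices_two_mul]

      · have hm2 : N = 2 * (N / 2) + 1 := by omega
        have hc1 : (decide ((c :: cs')[0]? = some '1')) = true := by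
          rw [hc, hp]; simp [Nat.digitChar]
        rw [hc1]
        simp only [if_true]
        conv_rhs => rw [hm2, Nat.bitIndices_two_mul_add_one]

/-- Splitting off a '1'-free suffix does not change the collected indices. -/
theorem filter_ones_append (cs rest : List Char) (hrest : '1' ∉ rest) :
    (List.range (cs.length + rest.length)).filter
        (fun i => decide ((cs ++ rest)[i]? = some '1'))
      = (List.range cs.length).filter (fun i => decide (cs[i]? = some '1')) := by
  rw [List.range_add, List.filter_append]
  have h2 : (List.filter (fun i => decide ((cs ++ rest)[i]? = some '1'))
      ((List.range rest.length).map (cs.length + ·))) = [] := by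
    rw [List.filter_eq_nil_iff]
    intro a ha
    obtain ⟨j, hj, rfl⟩ := List.mem_map.mp ha
    have : (cs ++ rest)[cs.length + j]? = rest[j]? := by
      rw [List.getElem?_append_right (by omega)]
      congr 1
      omega
    rw [this]
    simp only [decide_eq_true_eq]
    intro hc
    exact hrest (List.mem_of_getElem? hc)
  rw [h2, List.append_nil]
  apply List.filter_congr
  intro i hi
  rw [List.getElem?_append_left (List.mem_range.mp hi)]

/-- The nested loop of A, cleaned up: the subset sum selected by the bits of `x`. -/
def fSpec (os : List Nat) (x : Nat) : Int :=
  ((List.range os.length).map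
    (fun j => if x.testBit j then ((2 : Int) ^ (os.getD j 0)) else 0)).sum

theorem fSpec_append_lt (os : List Nat) (o : Nat) (x : Nat) (hx : x < 2 ^ os.length) :
    fSpec (os ++ [o]) x = fSpec os x := by
  unfold fSpec
  have hlen : (os ++ [o]).length = os.length + 1 := by simp
  rw [hlen, List.range_succ, List.map_append, List.sum_append]
  have hlast : ((List.map (fun j => if x.testBit j then ((2:Int) ^ ((os ++ [o]).getD j 0)) else 0) [os.length]).sum) = 0 := by
    simp [Nat.testBit_lt_two_pow hx]
  rw [hlast, add_zero]
  congr 1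
  apply List.map_congr_left
  intro j hj
  have hj' := List.mem_range.mp hj
  rw [List.getD_append _ _ _ _ hj']

theorem fSpec_append_add (os : List Nat) (o : Nat) (x : Nat) (hx : x < 2 ^ os.length) :
    fSpec (os ++ [o]) (2 ^ os.length + x) = fSpec os x + (2 : Int) ^ o := by
  unfold fSpec
  have hlen : (os ++ [o]).length = os.length + 1 := by simp
  rw [hlen, List.range_succ, List.map_append, List.sum_append]
  have hbit : (2 ^ os.length + x).testBit os.length = true := by
    rw [Nat.testBit_two_pow_add_eq, Nat.testBit_lt_two_pow hx]
    rfl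
  have hlast : ((List.map (fun j => if (2 ^ os.length + x).testBit j then ((2:Int) ^ ((os ++ [o]).getD j 0)) else 0) [os.length]).sum) = (2:Int) ^ o := by
    simp [hbit]

  rw [hlast]
  congr 1
  congr 1
  apply List.map_congr_left
  intro j hj
  have hj' := List.mem_range.mp hj
  rw [List.getD_append _ _ _ _ hj', Nat.testBit_two_pow_add_gt hj']

/-- A's outer loop over the 2^m counters equals the fold over the bit positions. -/
theorem map_fSpec_range (os : List Nat) :
    (List.range (2 ^ os.length)).map (fSpec os) = os.foldl sstep [0] := by
  induction os using List.reverseRecOn with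
  | nil => simp [fSpec]
  | append_singleton os o ih =>
    have hlen : (os ++ [o]).length = os.length + 1 := by simp
    rw [hlen, pow_succ, Nat.mul_two, List.range_add, List.map_append, List.map_map]
    rw [List.foldl_append]
    have h1 : (List.range (2 ^ os.length)).map (fSpec (os ++ [o]))
        = (List.range (2 ^ os.length)).map (fSpec os) := by
      apply List.map_congr_left
      intro x hx
      exact fSpec_append_lt os o x (List.mem_range.mp hx)
    have h2 : (List.range (2 ^ os.length)).map (fSpec (os ++ [o]) ∘ (2 ^ os.length + ·))
        = ((List.range (2 ^ os.length)).map (fSpec os)).map (fun t => t + (2 : Int) ^ o) := by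
      rw [List.map_map]
      apply List.map_congr_left
      intro x hx
      simp only [Function.comp_apply]
      exact fSpec_append_add os o x (List.mem_range.mp hx)
    rw [h1, h2, ih]
    rfl

/-- B's loop equals the same fold, with the bit value tracked as a power of two. -/
theorem solveAltGo_eq (fuel : Nat) : ∀ (m k : Nat) (ans : List Int), m ≤ fuel →
    solveAltGo fuel m ((2 : Int) ^ k) ans
      = (Nat.bitIndices m).foldl (fun a o => sstep a (o + k)) ans := by
  induction fuel with
  | zero =>
    intro m k ans hm
    have : m = 0 := by omega
    subst this
    simp [solveAltGo]
  | succ fuel ih =>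
    intro m k ans hm
    by_cases h0 : m = 0
    · subst h0; simp [solveAltGo]
    · rw [solveAltGo]
      simp only [h0, if_false]
      have hsh : ((2 : Int) ^ k) <<< (1:Nat) = (2 : Int) ^ (k + 1) := by
        rw [Int.shiftLeft_eq]; ring
      have hsr : m >>> 1 = m / 2 := Nat.shiftRight_one m
      have hand : m &&& 1 = m % 2 := Nat.and_one_is_mod m
      rw [hsh, hsr, hand]
      rcases Nat.mod_two_eq_zero_or_one m with hp | hp
      · -- even
        have hm2 : m = 2 * (m / 2) := by omega
        rw [hp]
        simp only [(by decide : (0 = 1) = False), if_false]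
        rw [ih (m / 2) (k + 1) ans (by omega)]
        conv_rhs => rw [hm2, Nat.bitIndices_two_mul]
        rw [List.foldl_map]
        apply PySem.List.foldl_congr_mem
        intro a o _
        congr 1
        omega
      · -- odd
        have hm2 : m = 2 * (m / 2) + 1 := by omega
        rw [hp]
        simp only [if_true]
        rw [ih (m / 2) (k + 1) _ (by omega)]
        conv_rhs => rw [hm2, Nat.bitIndices_two_mul_add_one]
        rw [List.foldl_cons, List.foldl_map]
        have : sstep ans (0 + k) = ans ++ ans.map (fun t => t + (2:Int) ^ k) := by
          simp [sstep]
        rw [this]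
        apply PySem.List.foldl_congr_mem
        intro a o _
        congr 1
        omega

theorem band_pow_pos_iff (x : Nat) (j : Nat) :
    (0 < PySem.Int.band (x:Int) ((1:Int) <<< j)) ↔ x.testBit j := by
  have h1 : (1:Int) <<< j = ((2^j : Nat) : Int) := by
    rw [Int.shiftLeft_eq]; push_cast; ring
  rw [h1, PySem.Int.band_natCast]
  have h2 := Nat.and_two_pow x j
  cases hb : x.testBit j
  · rw [hb] at h2
    simp only [Bool.toNat_false, Nat.zero_mul] at h2
    rw [h2]
    simp
  · rw [hb] at h2
    simp only [Bool.toNat_true, Nat.one_mul] at h2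
    rw [h2]
    simp only [iff_true]
    exact_mod_cast Nat.two_pow_pos j

/-- The `ones`-collecting loop of A as a filter over the character list. -/
theorem onesFold_eq (s2 : String) :
    (PySem.List.pyRange 0 (PySem.Str.len s2) 1).foldl
        (fun ones i => if PySem.Str.pyGet? s2 i = some '1' then ones ++ [i] else ones) []
      = ((List.range s2.toList.length).filter
          (fun i => decide (s2.toList[i]? = some '1'))).map (fun k : Nat => (k : Int)) := by
  rw [PySem.Str.len_eq, PySem.List.pyRange_zero_nat, List.foldl_map]
  rw [PySem.List.foldl_append_ite (p := fun i : Nat => PySem.Str.pyGet? s2 (i : Int) = some '1')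
    (f := fun i : Nat => (i : Int))]
  rw [List.nil_append]
  have hfc : (List.range s2.toList.length).filter
        (fun i : Nat => decide (PySem.Str.pyGet? s2 (i : Int) = some '1'))
      = (List.range s2.toList.length).filter
        (fun i : Nat => decide (s2.toList[i]? = some '1')) := by
    apply List.filter_congr
    intro i _
    simp
  rw [hfc]

/-- A's inner loop is `fSpec`. -/
theorem innerFold_eq (os : List Nat) (x : Nat) :
    (PySem.List.pyRange 0 (PySem.List.len (os.map (fun k : Nat => (k : Int)))) 1).foldl
        (fun tmp j =>
          if PySem.Int.band (x : Int) ((1 : Int) <<< (j.toNat : Int)) > 0 then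
            tmp + ((1 : Int) <<<
              (PySem.List.pyGetD (os.map (fun k : Nat => (k : Int))) j 0).toNat)
          else tmp) 0
      = fSpec os x := by
  rw [PySem.List.len_eq, List.length_map, PySem.List.pyRange_zero_nat, List.foldl_map]
  have hstep : ∀ (tmp : Int), ∀ j ∈ List.range os.length,
      (if PySem.Int.band (x : Int) ((1 : Int) <<< (((j : Int)).toNat : Int)) > 0 then
          tmp + ((1 : Int) <<<
            (PySem.List.pyGetD (os.map (fun k : Nat => (k : Int))) (j : Int) 0).toNat)
        else tmp)
      = tmp + (if x.testBit j then ((2 : Int) ^ (os.getD j 0)) else 0) := by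
    intro tmp j _
    have hget : PySem.List.pyGetD (os.map (fun k : Nat => (k : Int))) (j : Int) 0
        = ((os.getD j 0 : Nat) : Int) := by
      rw [PySem.List.pyGetD_natCast,
        show (0 : Int) = ((0 : Nat) : Int) from rfl, List.getD_map]
    rw [Int.toNat_natCast, hget, Int.toNat_natCast, Int.shiftLeft_natCast_right]
    have hshift : (1 : Int) <<< (os.getD j 0) = (2 : Int) ^ (os.getD j 0) := by
      rw [Int.shiftLeft_eq, one_mul]
    rw [hshift]
    by_cases hb : x.testBit j
    · rw [if_pos ((band_pow_pos_iff x j).mpr hb), if_pos hb]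
    · rw [if_neg (fun hc => hb ((band_pow_pos_iff x j).mp hc)), if_neg hb, add_zero]
  refine (PySem.List.foldl_congr_mem _ _ _ _ hstep).trans ?_
  rw [PySem.List.foldl_add (g := fun j : Nat => if x.testBit j then ((2 : Int) ^ (os.getD j 0)) else 0)]
  rw [zero_add]
  rfl

/-- A's outer fold over the counters, for a given ones list. -/
theorem outerFold_eq (os : List Nat) :
    (PySem.List.pyRange 0
        ((2 : Int) ^ (PySem.List.len (os.map (fun k : Nat => (k : Int)))).toNat) 1).foldl
      (fun ans x => ans ++
        [(PySem.List.pyRange 0 (PySem.List.len (os.map (fun k : Nat => (k : Int)))) 1).foldl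
          (fun tmp j =>
            if PySem.Int.band x ((1 : Int) <<< (j.toNat : Int)) > 0 then
              tmp + ((1 : Int) <<<
                (PySem.List.pyGetD (os.map (fun k : Nat => (k : Int))) j 0).toNat)
            else tmp) 0]) []
    = os.foldl sstep [0] := by
  have hlen : (PySem.List.len (os.map (fun k : Nat => (k : Int)))).toNat = os.length := by
    rw [PySem.List.len_eq, List.length_map, Int.toNat_natCast]
  rw [hlen]
  have hcast : (2 : Int) ^ os.length = ((2 ^ os.length : Nat) : Int) := by push_cast; ring
  rw [hcast, PySem.List.pyRange_zero_nat, List.foldl_map]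
  rw [PySem.List.foldl_append_singleton_eq_map, List.nil_append]
  rw [← map_fSpec_range os]
  apply List.map_congr_left
  intro x _
  exact innerFold_eq os x

/-- Assembling A: on nonzero input, `solve` is the fold over the set-bit positions of `|n|`. -/
theorem solve_eq_foldl (n : Int) (h : n ≠ 0) :
    solve n = (Nat.bitIndices n.natAbs).foldl sstep [0] := by
  unfold solve
  simp only []
  rw [onesFold_eq]
  have hX : (PySem.Str.slice (PySem.Int.pyBin n) (some 2) none).toList
      = (PySem.Int.toBinChars0b n).drop 2 := by
    rw [PySem.Str.toList_slice, PySem.Chars.slice_eq_listSlice,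
      PySem.List.slice_from _ (by norm_num : (0:Int) ≤ 2), PySem.Int.toList_pyBin]
    rfl
  have hs2 : ((PySem.Str.slice? (PySem.Str.slice (PySem.Int.pyBin n) (some 2) none) none none
          (-1)).getD (PySem.Str.slice (PySem.Int.pyBin n) (some 2) none)).toList
      = ((PySem.Int.toBinChars0b n).drop 2).reverse := by
    rw [PySem.Str.slice?_none_none_neg_one, Option.getD_some, String.toList_ofList, hX]
  rw [hs2]
  rcases lt_or_gt_of_ne h with hneg | hpos
  · have hbc : PySem.Int.toBinChars0b n = '-' :: '0' :: 'b' :: Nat.toDigits 2 n.natAbs := by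
      unfold PySem.Int.toBinChars0b
      rw [if_pos hneg]
    rw [hbc]
    have hd : (('-' :: '0' :: 'b' :: Nat.toDigits 2 n.natAbs).drop 2).reverse
        = ((Nat.digits 2 n.natAbs).map Nat.digitChar) ++ ['b'] := by
      rw [toDigits_two_eq n.natAbs (by omega)]
      simp
    rw [hd]
    have hfl : List.filter
          (fun i => decide (((((Nat.digits 2 n.natAbs).map Nat.digitChar) ++ ['b'])[i]?) = some '1'))
          (List.range ((((Nat.digits 2 n.natAbs).map Nat.digitChar) ++ ['b']).length))
        = Nat.bitIndices n.natAbs := by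
      rw [List.length_append,
        filter_ones_append ((Nat.digits 2 n.natAbs).map Nat.digitChar) ['b'] (by decide)]
      exact filter_ones_digits _
    rw [hfl]
    exact outerFold_eq _
  · have hbc : PySem.Int.toBinChars0b n = '0' :: 'b' :: Nat.toDigits 2 n.toNat := by
      unfold PySem.Int.toBinChars0b
      rw [if_neg (by omega)]
    have hab : n.toNat = n.natAbs := by omega
    rw [hbc, hab]
    have hd : (('0' :: 'b' :: Nat.toDigits 2 n.natAbs).drop 2).reverse
        = (Nat.digits 2 n.natAbs).map Nat.digitChar := by
      rw [toDigits_two_eq n.natAbs (by omega)]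
      simp
    rw [hd, filter_ones_digits]
    exact outerFold_eq _

theorem solve_alt_eq_foldl (n : Int) :
    solve_alt n = (Nat.bitIndices n.natAbs).foldl sstep [0] := by
  have h1 : (if n < 0 then -n else n).toNat = n.natAbs := by split <;> omega
  have h2 := solveAltGo_eq n.natAbs n.natAbs 0 [0] (le_refl _)
  simp only [pow_zero] at h2
  unfold solve_alt
  rw [h1, h2]
  apply PySem.List.foldl_congr_mem
  intro a o _
  rw [Nat.add_zero]

-- ===== VERDICT (by name: the statement is the Claim_ definition above) =====
theorem solve_spec : Claim_equal_solve := by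
  intro n _
  unfold Spec_solve
  rcases eq_or_ne n 0 with h0 | h0
  · subst h0; decide
  · rw [solve_eq_foldl n h0, solve_alt_eq_foldl n]
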